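-- pv_equiv track=rewrite | github.com/kitshinghk-crypto/ctf_writeups | reloaded/level4.py | process_secret
-- ===== SOURCE A (Python) =====
-- def process_ind(i):
--     if (i>3):
--         p=2
--         while i>p:
--             if (i%p ==0):
--                 return 0
--             p=p+1
--     return 1
--
-- def process_secret(secret):
--     secret_len = len(secret)
--     i=0;
--     while (i<secret_len):
--         is_xor_i = process_ind(i)
--         if (is_xor_i==0):
--             secret[i]=secret[i] ^ 0x37
--         else:
--             secret[i]=secret[i] ^ i
--         i=i+1
--     return secret
-- ===== SOURCE B (Python) =====
-- def process_secret(secret):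
--     # Same mutation as A: rewrites secret in place and returns it.
--     def is_composite(i):
--         if i <= 3:
--             return False
--         p = 2
--         while p * p <= i:
--             if i % p == 0:
--                 return True
--             p += 1
--         return False
--     secret[:] = [x ^ 0x37 if is_composite(i) else x ^ i for i, x in enumerate(secret)]
--     return secret
-- ===== Notes on version B (the rewrite author's own statement) =====
-- stated objective: faster
-- what changed: Replaces A's full trial division of each index i over all p in [2,i) and its in-place index-while loop by a sqrt-bounded divisor test (stop once p*p > i) driving a single enumerate comprehension, cutting the per-index cost from O(i) to O(sqrt(i)).
import Mathlib
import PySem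

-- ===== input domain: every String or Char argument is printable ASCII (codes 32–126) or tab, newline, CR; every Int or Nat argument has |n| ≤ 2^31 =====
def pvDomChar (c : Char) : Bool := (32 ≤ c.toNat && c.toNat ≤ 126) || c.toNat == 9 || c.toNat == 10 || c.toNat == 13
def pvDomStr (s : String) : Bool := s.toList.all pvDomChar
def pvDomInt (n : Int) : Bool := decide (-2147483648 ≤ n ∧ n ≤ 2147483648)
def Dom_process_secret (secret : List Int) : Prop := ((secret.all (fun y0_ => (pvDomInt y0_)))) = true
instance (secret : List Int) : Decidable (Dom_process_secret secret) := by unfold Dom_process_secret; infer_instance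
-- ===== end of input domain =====

-- B replaces A's per-index scan of all p in [2,i) by a sqrt-bounded divisor test and a single
-- enumerate comprehension (faster). Both Pythons mutate `secret` in place identically; the
-- equivalence proved here is about the returned list.

-- ===== PORT A =====
-- the `while i>p` loop of process_ind, starting at p
def processIndLoop (i p : Nat) : Int :=
  if i > p then
    (if i % p = 0 then 0 else processIndLoop i (p + 1))
  else 1
termination_by i - p

def processInd (i : Nat) : Int :=
  if i > 3 then processIndLoop i 2 else 1

-- the `while i < secret_len` loop, rewriting each cell from index i on
def processLoopA (xs : List Int) (i : Nat) : List Int :=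
  match xs with
  | [] => []
  | x :: rest =>
      (if processInd i = 0 then PySem.Int.bxor x 0x37 else PySem.Int.bxor x (Int.ofNat i))
        :: processLoopA rest (i + 1)

def process_secret (secret : List Int) : List Int :=
  processLoopA secret 0

-- ===== PORT B =====
-- `while p*p <= i` loop of is_composite, starting at p
def isCompositeLoop (i p : Nat) : Bool :=
  if p * p ≤ i then
    (if i % p = 0 then true else isCompositeLoop i (p + 1))
  else false
termination_by i + 1 - p
decreasing_by
  have hp : p ≤ i := by nlinarith
  omega

def isComposite (i : Int) : Bool :=
  if i ≤ 3 then false else isCompositeLoop i.toNat 2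

def process_secret_alt (secret : List Int) : List Int :=
  (PySem.List.enumerate secret 0).map
    (fun p => if isComposite p.1 then PySem.Int.bxor p.2 0x37 else PySem.Int.bxor p.2 p.1)

-- ===== PRECONDITION & SPEC =====
def Spec_process_secret (secret : List Int) (out : List Int) : Prop := out = process_secret_alt secret
instance (secret : List Int) (out : List Int) : Decidable (Spec_process_secret secret out) := by unfold Spec_process_secret; infer_instance

-- ===== CLAIM (what is proved, stated in full; the proofs are below) =====
def Claim_equal_process_secret : Prop := ∀ (secret : List Int), Dom_process_secret secret → Spec_process_secret secret (process_secret secret)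

-- ===== LEMMAS AND PROOFS =====

lemma processIndLoop_eq_zero_iff (i p : Nat) :
    processIndLoop i p = 0 ↔ ∃ q, p ≤ q ∧ q < i ∧ i % q = 0 := by
  fun_induction processIndLoop i p with
  | case1 p hgt hmod =>
      exact iff_of_true rfl ⟨p, le_refl p, hgt, hmod⟩
  | case2 p hgt hmod ih =>
      rw [ih]
      constructor
      · rintro ⟨q, hq1, hq2, hq3⟩; exact ⟨q, by omega, hq2, hq3⟩
      · rintro ⟨q, hq1, hq2, hq3⟩
        refine ⟨q, ?_, hq2, hq3⟩
        rcases Nat.eq_or_lt_of_le hq1 with h | h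
        · exact absurd (h ▸ hq3) hmod
        · omega
  | case3 p hle =>
      refine iff_of_false (by decide) ?_
      rintro ⟨q, hq1, hq2, _⟩; omega

lemma isCompositeLoop_eq_true_iff (i p : Nat) :
    isCompositeLoop i p = true ↔ ∃ q, p ≤ q ∧ q * q ≤ i ∧ i % q = 0 := by
  fun_induction isCompositeLoop i p with
  | case1 p hle hmod =>
      exact iff_of_true rfl ⟨p, le_refl p, hle, hmod⟩
  | case2 p hle hmod ih =>
      rw [ih]
      constructor
      · rintro ⟨q, hq1, hq2, hq3⟩; exact ⟨q, by omega, hq2, hq3⟩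
      · rintro ⟨q, hq1, hq2, hq3⟩
        refine ⟨q, ?_, hq2, hq3⟩
        rcases Nat.eq_or_lt_of_le hq1 with h | h
        · exact absurd (h ▸ hq3) hmod
        · omega
  | case3 p hgt =>
      refine iff_of_false (by decide) ?_
      rintro ⟨q, hq1, hq2, _⟩
      exact hgt (le_trans (by nlinarith) hq2)

-- a number > 3 has a proper divisor iff it has one below its square root
lemma sqrt_divisor_iff (n : Nat) (hn : 3 < n) :
    (∃ q, 2 ≤ q ∧ q < n ∧ n % q = 0) ↔ (∃ q, 2 ≤ q ∧ q * q ≤ n ∧ n % q = 0) := by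
  constructor
  · rintro ⟨q, hq2, hqn, hmod⟩
    by_cases hsq : q * q ≤ n
    · exact ⟨q, hq2, hsq, hmod⟩
    · have hq0 : 0 < q := by omega
      have hdvd : q ∣ n := Nat.dvd_of_mod_eq_zero hmod
      obtain ⟨r, hr⟩ := hdvd
      have hr2 : 2 ≤ r := by
        rcases Nat.lt_or_ge r 2 with h | h
        · interval_cases r <;> omega
        · exact h
      have hrq : r < q := by nlinarith
      refine ⟨r, hr2, by nlinarith, ?_⟩
      have hdr : r ∣ n := ⟨q, by rw [hr, Nat.mul_comm]⟩
      exact Nat.mod_eq_zero_of_dvd hdr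
  · rintro ⟨q, hq2, hsq, hmod⟩
    exact ⟨q, hq2, by nlinarith, hmod⟩

lemma processInd_eq_zero_iff_isComposite (i : Nat) :
    (processInd i = 0) ↔ isComposite (Int.ofNat i) = true := by
  unfold processInd isComposite
  by_cases h3 : 3 < i
  · have h3' : ¬ ((Int.ofNat i) ≤ 3) := by simp [Int.ofNat_eq_natCast]; omega
    simp only [if_pos h3, if_neg h3']
    have htn : (Int.ofNat i).toNat = i := rfl
    rw [htn, processIndLoop_eq_zero_iff, isCompositeLoop_eq_true_iff]
    exact sqrt_divisor_iff i h3
  · have h3' : (Int.ofNat i) ≤ 3 := by simp [Int.ofNat_eq_natCast]; omega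
    simp only [if_neg h3, if_pos h3']
    norm_num

lemma processLoopA_eq_map (xs : List Int) (i : Nat) :
    processLoopA xs i =
      (PySem.List.enumerate xs (Int.ofNat i)).map
        (fun p => if isComposite p.1 then PySem.Int.bxor p.2 0x37 else PySem.Int.bxor p.2 p.1) := by
  induction xs generalizing i with
  | nil => simp [processLoopA, PySem.List.enumerate_nil]
  | cons x rest ih =>
      rw [processLoopA, PySem.List.enumerate_cons, List.map_cons]
      have hsucc : (Int.ofNat i) + 1 = Int.ofNat (i + 1) := by simp
      rw [hsucc, ← ih]
      congr 1
      by_cases hc : processInd i = 0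
      · rw [if_pos hc, if_pos ((processInd_eq_zero_iff_isComposite i).mp hc)]
      · rw [if_neg hc,
            if_neg (fun h => hc ((processInd_eq_zero_iff_isComposite i).mpr h))]

-- ===== VERDICT (by name: the statement is the Claim_ definition above) =====
theorem process_secret_spec : Claim_equal_process_secret := by
  intro secret _
  show process_secret secret = process_secret_alt secret
  unfold process_secret process_secret_alt
  exact processLoopA_eq_map secret 0
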